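-- pv_equiv track=rewrite | github.com/ShivamKSah/ShivamKSah-Compiler-Design-Lab | Lab11_Quad_Triple/quad_triple.py | generate
-- ===== SOURCE A (Python) =====
-- class TempGen:
--     def __init__(self): self.n = 0
--     def new(self): self.n += 1; return f"t{self.n}"
--
-- def generate(postfix_expr):
--     tokens = postfix_expr.split()
--     ops = set('+-*/^')
--     stack = []
--     quads, triples = [], []
--     temp = TempGen()
--
--     for tok in tokens:
--         if tok not in ops:
--             stack.append(tok)
--         else:
--             b, a = stack.pop(), stack.pop()
--             t = temp.new()
--             idx = len(triples)     # 0-based index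
--
--             quads.append((tok, a, b, t))
--             triples.append((tok, a, b))
--             stack.append(t)
--
--     # Indirect triples = pointer list into triples table
--     indirect = list(range(len(triples)))
--     return quads, triples, indirect
-- ===== SOURCE B (Python) =====
-- def generate(postfix_expr):
--     ops = set('+-*/^')
--     toks = postfix_expr.split()
--     triples = []
--     # Repeatedly reduce the leftmost operator redex of the token list itself:
--     # replace "... a b op ..." by the temp naming the triple just emitted.
--     while any(t in ops for t in toks):
--         i = next(k for k, t in enumerate(toks) if t in ops)
--         a, b = toks[i - 2], toks[i - 1]
--         triples.append((toks[i], a, b))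
--         toks[i - 2:i + 1] = [f"t{len(triples)}"]
--     quads = [(op, a, b, f"t{j + 1}") for j, (op, a, b) in enumerate(triples)]
--     return quads, triples, list(range(len(triples)))
-- ===== Notes on version B (the rewrite author's own statement) =====
-- stated objective: alternative
-- what changed: B replaces the operand stack entirely by a term-rewriting reduction: it repeatedly finds the leftmost operator in the token list, emits the triple from the two tokens preceding it, and splices the temp name back into the list in their place; quads and the indirect list are then synthesized from the triples table in separate passes.
import Mathlib
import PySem

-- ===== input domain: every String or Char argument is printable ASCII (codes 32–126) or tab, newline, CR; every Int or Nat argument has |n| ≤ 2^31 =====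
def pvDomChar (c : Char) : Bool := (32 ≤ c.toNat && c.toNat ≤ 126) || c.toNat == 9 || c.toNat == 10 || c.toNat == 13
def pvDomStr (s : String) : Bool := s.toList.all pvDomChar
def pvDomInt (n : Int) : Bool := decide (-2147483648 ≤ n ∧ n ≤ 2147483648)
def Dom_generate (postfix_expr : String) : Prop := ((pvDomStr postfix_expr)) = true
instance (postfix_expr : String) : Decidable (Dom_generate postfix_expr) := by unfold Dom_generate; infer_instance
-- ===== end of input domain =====

-- B drops the operand stack: it repeatedly reduces the leftmost operator redex of the
-- token list itself and then synthesizes quads/indirect from the triples table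
-- (objective: alternative algorithm, same results, O(n^2) scans instead of one stack pass).

-- ===== PORT A =====
-- ops = set('+-*/^'); membership of a token in that set
def pvOps : PySem.Set String := PySem.Set.ofList ["+", "-", "*", "/", "^"]
def pvIsOp (t : String) : Bool := pvOps.contains t

-- the for-loop of A: state (stack, quads, triples, temp.n); stack head = top.
-- The '| _ =>' stack arm is where Python raises IndexError (excluded by Pre_generate).
def generateGoA : List String → List String → List (String × String × String × String) →
    List (String × String × String) → Int →
    (List (String × String × String × String)) × (List (String × String × String))
  | [], _, quads, triples, _ => (quads, triples)
  | tok :: rest, stack, quads, triples, n =>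
    if pvIsOp tok = false then
      generateGoA rest (tok :: stack) quads triples n
    else
      match stack with
      | b :: a :: s =>
        let t := "t" ++ PySem.Int.toStr (n + 1)
        generateGoA rest (t :: s) (quads ++ [(tok, a, b, t)]) (triples ++ [(tok, a, b)]) (n + 1)
      | _ => generateGoA rest stack quads triples n

def generate (postfix_expr : String) : (List (String × String × String × String)) × (List (String × String × String)) × List Int :=
  let toks := PySem.Str.split₀ postfix_expr
  let qt := generateGoA toks [] [] [] 0
  (qt.1, qt.2, PySem.List.pyRange 0 (qt.2.length : Int) 1)

-- ===== PORT B =====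
-- Source B's while-loop: find the leftmost operator token, emit the triple from the two
-- tokens before it, splice the temp name back in their place.  Ported with fuel
-- (len(toks)+1 bounds the loop: each iteration replaces one operator by a non-operator
-- temp).  The 'IndexError' arm (negative index out of range, Python raises) stops.
def generateGoB : Nat → List String → List (String × String × String) → List (String × String × String)
  | 0, _, ts => ts
  | fuel + 1, toks, ts =>
    match toks.findIdx? pvIsOp with
    | none => ts
    | some i =>
      match PySem.List.pyGet? toks ((i : Int) - 2), PySem.List.pyGet? toks ((i : Int) - 1) with
      | some a, some b =>
        let ts' := ts ++ [(toks.getD i "", a, b)]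
        generateGoB fuel
          (PySem.List.slice toks none (some ((i : Int) - 2)) ++
            ("t" ++ PySem.Int.toStr (ts'.length : Int)) ::
              PySem.List.slice toks (some ((i : Int) + 1)) none)
          ts'
      | _, _ => ts

-- B's quad-synthesis pass: [(op, a, b, f"t{j+1}") for j, (op, a, b) in enumerate(triples)]
def pvMkQuads (ts : List (String × String × String)) : List (String × String × String × String) :=
  (PySem.List.enumerate ts 0).map (fun p => (p.2.1, p.2.2.1, p.2.2.2, "t" ++ PySem.Int.toStr (p.1 + 1)))

def generate_alt (postfix_expr : String) : (List (String × String × String × String)) × (List (String × String × String)) × List Int :=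
  let toks := PySem.Str.split₀ postfix_expr
  let triples := generateGoB (toks.length + 1) toks []
  (pvMkQuads triples, triples, PySem.List.pyRange 0 (triples.length : Int) 1)

-- ===== PRECONDITION & SPEC =====
-- Pre_ excludes exactly the malformed postfix strings on which A's two stack.pop() calls
-- raise IndexError: some operator token is reached with fewer than two stack entries, i.e.
-- (#operands − #operators) < 2 just before it.
def Pre_generate (postfix_expr : String) : Prop :=
  let toks := PySem.Str.split₀ postfix_expr
  ∀ k, (h : k < toks.length) → pvIsOp toks[k] = true →
    ((toks.take k).countP (fun t => pvIsOp t = false)) ≥ ((toks.take k).countP (fun t => pvIsOp t = true)) + 2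
instance (postfix_expr : String) : Decidable (Pre_generate postfix_expr) := by unfold Pre_generate; infer_instance

def pvWitness_generate : String := "a b + c *"

def Spec_generate (postfix_expr : String) (out : (List (String × String × String × String)) × (List (String × String × String)) × List Int) : Prop := out = generate_alt postfix_expr
instance (postfix_expr : String) (out : (List (String × String × String × String)) × (List (String × String × String)) × List Int) : Decidable (Spec_generate postfix_expr out) := by unfold Spec_generate; infer_instance

-- ===== CLAIM (what is proved, stated in full; the proofs are below) =====
def Claim_equal_generate : Prop := ∀ (postfix_expr : String), Dom_generate postfix_expr → Pre_generate postfix_expr → Spec_generate postfix_expr (generate postfix_expr)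

-- ===== LEMMAS AND PROOFS =====

-- proof-side mirror of A's loop keeping only the triples (temp counter = triples length)
def goT : List String → List String → List (String × String × String) → List (String × String × String)
  | [], _, ts => ts
  | tok :: rest, stack, ts =>
    if pvIsOp tok = false then
      goT rest (tok :: stack) ts
    else
      match stack with
      | b :: a :: s =>
        goT rest (("t" ++ PySem.Int.toStr ((ts.length : Int) + 1)) :: s) (ts ++ [(tok, a, b)])
      | _ => goT rest stack ts

lemma pvMkQuads_append_one (ts : List (String × String × String)) (o a b : String) :
    pvMkQuads (ts ++ [(o, a, b)]) =
      pvMkQuads ts ++ [(o, a, b, "t" ++ PySem.Int.toStr ((ts.length : Int) + 1))] := by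
  simp [pvMkQuads, PySem.List.enumerate_append, PySem.List.enumerate_cons, PySem.List.enumerate_nil]

-- A's loop from a state whose quads/temp-counter are determined by its triples table
lemma goA_eq_goT (toks : List String) : ∀ (stack : List String) (ts : List (String × String × String)),
    generateGoA toks stack (pvMkQuads ts) ts (ts.length : Int)
      = (pvMkQuads (goT toks stack ts), goT toks stack ts) := by
  induction toks with
  | nil => intro stack ts; simp [generateGoA, goT]
  | cons tok rest ih =>
    intro stack ts
    by_cases hop : pvIsOp tok = true
    · match stack with
      | b :: a :: s =>
        simp only [generateGoA, goT, hop, Bool.true_eq_false, if_false]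
        rw [← pvMkQuads_append_one,
          show ((ts.length : Int) + 1) = (((ts ++ [(tok, a, b)]).length : Int)) from by simp]
        exact ih _ _
      | [] =>
        simp only [generateGoA, goT, hop, Bool.true_eq_false, if_false]
        exact ih _ _
      | [c] =>
        simp only [generateGoA, goT, hop, Bool.true_eq_false, if_false]
        exact ih _ _
    · simp only [Bool.not_eq_true] at hop
      simp only [generateGoA, goT, hop, if_true]
      exact ih _ _

-- temp names are never operator tokens
lemma isOp_t (x : String) : pvIsOp ("t" ++ x) = false := by
  simp only [pvIsOp, pvOps, PySem.Set.ofList, PySem.Set.empty, PySem.Set.contains]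
  have h : (List.foldl PySem.Set.add [] ["+", "-", "*", "/", "^"] : List String)
      = ["+", "-", "*", "/", "^"] := by decide
  rw [h]
  simp only [List.contains_eq_mem, decide_eq_false_iff_not, List.mem_cons, List.not_mem_nil,
    or_false, not_or, String.ext_iff]
  simp

-- the 'enough operands before each operator' invariant, relative to the current stack
def goodRel (stack toks : List String) : Prop :=
  ∀ k, (h : k < toks.length) → pvIsOp toks[k] = true →
    stack.length + ((toks.take k).countP (fun t => pvIsOp t = false)) ≥
      ((toks.take k).countP (fun t => pvIsOp t = true)) + 2

-- main invariant: B's reduction over (stack.reverse ++ toks) computes A's triples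
lemma goB_eq_goT (toks : List String) : ∀ (fuel : Nat) (stack : List String) (ts : List (String × String × String)),
    (∀ x ∈ stack, pvIsOp x = false) → goodRel stack toks →
    toks.countP (fun t => pvIsOp t) + 1 ≤ fuel →
    generateGoB fuel (stack.reverse ++ toks) ts = goT toks stack ts := by
  induction toks with
  | nil =>
    intro fuel stack ts hstk hrel hf
    obtain ⟨f, rfl⟩ : ∃ f, fuel = f + 1 := ⟨fuel - 1, by omega⟩
    have hnone : stack.reverse.findIdx? pvIsOp = none :=
      List.findIdx?_eq_none_iff.mpr (fun x hx => hstk x (List.mem_reverse.mp hx))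
    simp [generateGoB, goT, hnone]
  | cons tok rest ih =>
    intro fuel stack ts hstk hrel hf
    by_cases hop : pvIsOp tok = true
    · -- operator token: the leftmost operator of stack.reverse ++ tok :: rest is tok itself
      have hlen2 : 2 ≤ stack.length := by
        have := hrel 0 (by simp) (by simpa using hop)
        simpa using this
      obtain ⟨b, a, s, rfl⟩ : ∃ b a s, stack = b :: a :: s := by
        match stack, hlen2 with
        | b :: a :: s, _ => exact ⟨b, a, s, rfl⟩
      obtain ⟨f, rfl⟩ : ∃ f, fuel = f + 1 := ⟨fuel - 1, by omega⟩
      have hsnone : ((b :: a :: s).reverse).findIdx? pvIsOp = none :=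
        List.findIdx?_eq_none_iff.mpr (fun x hx => hstk x (List.mem_reverse.mp hx))
      set L := (b :: a :: s).reverse ++ tok :: rest with hL
      have h1 : L.findIdx? pvIsOp = some (s.length + 2) := by
        rw [hL, List.findIdx?_append, hsnone, List.findIdx?_cons, if_pos hop]
        simp
      have hrev : (b :: a :: s).reverse = s.reverse ++ [a, b] := by simp
      have h2 : PySem.List.pyGet? L ((↑(s.length + 2) : Int) - 2) = some a := by
        have hc : ((↑(s.length + 2) : Int) - 2) = ((s.length : Nat) : Int) := by push_cast; ring
        rw [hc, PySem.List.pyGet?_natCast, hL, hrev, List.append_assoc,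
          List.getElem?_append_right (by simp)]
        simp
      have h3 : PySem.List.pyGet? L ((↑(s.length + 2) : Int) - 1) = some b := by
        have hc : ((↑(s.length + 2) : Int) - 1) = ((s.length + 1 : Nat) : Int) := by push_cast; ring
        rw [hc, PySem.List.pyGet?_natCast, hL, hrev, List.append_assoc,
          List.getElem?_append_right (by simp)]
        simp
      have h4 : L.getD (s.length + 2) "" = tok := by
        rw [List.getD_eq_getElem?_getD, hL, List.getElem?_append_right (by simp)]
        simp
      have h5 : PySem.List.slice L none (some ((↑(s.length + 2) : Int) - 2)) = s.reverse := by
        have hc : ((↑(s.length + 2) : Int) - 2) = ((s.length : Nat) : Int) := by push_cast; ring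
        rw [hc, PySem.List.slice_to_natCast, hL, hrev, List.append_assoc,
          List.take_left' (by simp)]
      have h6 : PySem.List.slice L (some ((↑(s.length + 2) : Int) + 1)) none = rest := by
        have hc : ((↑(s.length + 2) : Int) + 1) = ((s.length + 3 : Nat) : Int) := by push_cast; ring
        rw [hc, PySem.List.slice_from_natCast, hL]
        have : (b :: a :: s).reverse ++ tok :: rest = ((b :: a :: s).reverse ++ [tok]) ++ rest := by
          simp
        rw [this, List.drop_left' (by simp)]
      simp only [generateGoB, h1, h2, h3, h4, h5, h6]
      have hteq : ((ts ++ [(tok, a, b)]).length : Int) = (ts.length : Int) + 1 := by simp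
      rw [hteq]
      have hre : s.reverse ++ ("t" ++ PySem.Int.toStr ((ts.length : Int) + 1)) :: rest
          = (("t" ++ PySem.Int.toStr ((ts.length : Int) + 1)) :: s).reverse ++ rest := by
        simp
      rw [hre, ih f _ _ ?_ ?_ ?_]
      · simp only [goT, hop, Bool.true_eq_false, if_false]
      · intro x hx
        rcases List.mem_cons.mp hx with rfl | hx
        · exact isOp_t _
        · exact hstk x (by simp [hx])
      · intro k h hk
        have := hrel (k + 1) (by simpa using h) (by simpa using hk)
        simp [List.take_succ_cons, hop] at this ⊢
        omega
      · have : (tok :: rest).countP (fun t => pvIsOp t) = rest.countP (fun t => pvIsOp t) + 1 := by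
          simp [hop]
        omega
    · -- operand token: push; the combined token list is unchanged
      have hop' : pvIsOp tok = false := by simpa using hop
      have hre : stack.reverse ++ tok :: rest = (tok :: stack).reverse ++ rest := by simp
      rw [hre, ih fuel _ _ ?_ ?_ ?_]
      · simp only [goT, hop', if_true]
      · intro x hx
        rcases List.mem_cons.mp hx with rfl | hx
        · exact hop'
        · exact hstk x hx
      · intro k h hk
        have := hrel (k + 1) (by simpa using h) (by simpa using hk)
        simp [List.take_succ_cons, hop'] at this ⊢
        omega
      · have : (tok :: rest).countP (fun t => pvIsOp t) = rest.countP (fun t => pvIsOp t) := by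
          simp [hop']
        omega

-- ===== VERDICT (by name: the statement is the Claim_ definition above) =====
theorem generate_spec : Claim_equal_generate := by
  intro s _ hpre
  unfold Spec_generate generate generate_alt
  have hA := goA_eq_goT (PySem.Str.split₀ s) [] []
  norm_num [pvMkQuads, PySem.List.enumerate_nil] at hA
  have hB : generateGoB ((PySem.Str.split₀ s).length + 1) (PySem.Str.split₀ s) []
      = goT (PySem.Str.split₀ s) [] [] := by
    have := goB_eq_goT (PySem.Str.split₀ s) ((PySem.Str.split₀ s).length + 1) [] []
      (by simp) (by intro k h hk; have := hpre k h hk; simpa using this)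
      (by have := List.countP_le_length (l := PySem.Str.split₀ s) (p := fun t => pvIsOp t); omega)
    simpa using this
  simp [hA, hB, pvMkQuads]
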